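-- pv_equiv track=rewrite | github.com/jdfalk/ghcommon | scripts/update-calling-workflows.py | add_permissions_to_workflow
-- ===== SOURCE A (Python) =====
-- from typing import Dict, Any, List
--
-- def add_permissions_to_workflow(content: str, permissions: Dict[str, str]) -> str:
--     """Add permissions block to a workflow file."""
--     lines = content.split("\n")
--
--     # Find the right place to insert permissions
--     # Should be after 'on:' block but before 'jobs:'
--     insert_index = 0
--     in_on_block = False
--     on_block_end = 0
--
--     for i, line in enumerate(lines):
--         stripped = line.strip()
--
--         if stripped.startswith("on:"):
--             in_on_block = True
--             continue
--
--         if in_on_block: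
--             # Check if we're still in the on block
--             if (
--                 stripped
--                 and not line.startswith(" ")
--                 and not line.startswith("\t")
--                 and ":" in stripped
--             ):
--                 # We've reached the next top-level block
--                 on_block_end = i
--                 break
--             elif stripped.startswith("jobs:"):
--                 on_block_end = i
--                 break
--
--         if stripped.startswith("jobs:"):
--             on_block_end = i
--             break
--
--     if on_block_end == 0:
--         # Fallback: insert at the beginning if we can't find a good spot
--         insert_index = 0
--         for i, line in enumerate(lines):
--             if line.strip().startswith("name:"):
--                 insert_index = i + 1
--                 break
--     else:
--         insert_index = on_block_end
--
--     # Create permissions block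
--     permissions_lines = [
--         "",
--         "# Required permissions for reusable workflows",
--         "permissions:",
--     ]
--
--     for key, value in sorted(permissions.items()):
--         permissions_lines.append(f"  {key}: {value}")
--
--     # Insert the permissions block
--     lines[insert_index:insert_index] = permissions_lines
--
--     return "\n".join(lines)
-- ===== SOURCE B (Python) =====
-- def add_permissions_to_workflow(content: str, permissions: dict) -> str:
--     """Add permissions block to a workflow file."""
--     lines = content.split("\n")
--
--     def first_index(pred, start=0):
--         for i in range(start, len(lines)):
--             if pred(lines[i]):
--                 return i
--         return None
--
--     def is_on(line):
--         return line.strip().startswith("on:")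
--
--     def is_jobs(line):
--         return line.strip().startswith("jobs:")
--
--     def is_top_key(line):
--         s = line.strip()
--         return (not is_on(line)) and bool(s) \
--             and not line.startswith(" ") and not line.startswith("\t") \
--             and ":" in s
--
--     jobs_idx = first_index(is_jobs)
--     on_idx = first_index(is_on)
--     top_idx = first_index(is_top_key, on_idx + 1) if on_idx is not None else None
--
--     candidates = [i for i in (jobs_idx, top_idx) if i is not None]
--     end = min(candidates) if candidates else 0
--
--     if end != 0:
--         insert_index = end
--     else:
--         name_idx = first_index(lambda l: l.strip().startswith("name:"))
--         insert_index = name_idx + 1 if name_idx is not None else 0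
--
--     block = ["", "# Required permissions for reusable workflows", "permissions:"]
--     block += [f"  {key}: {value}" for key, value in sorted(permissions.items())]
--
--     return "\n".join(lines[:insert_index] + block + lines[insert_index:])
-- ===== Notes on version B (the rewrite author's own statement) =====
-- stated objective: simpler
-- what changed: A's single stateful break/continue scan with an in_on_block flag is replaced by independent first-index searches (first 'jobs:' line, first 'on:' line, first top-level key after it) combined by a minimum, with the insertion point then chosen in a separate step.
import Mathlib
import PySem

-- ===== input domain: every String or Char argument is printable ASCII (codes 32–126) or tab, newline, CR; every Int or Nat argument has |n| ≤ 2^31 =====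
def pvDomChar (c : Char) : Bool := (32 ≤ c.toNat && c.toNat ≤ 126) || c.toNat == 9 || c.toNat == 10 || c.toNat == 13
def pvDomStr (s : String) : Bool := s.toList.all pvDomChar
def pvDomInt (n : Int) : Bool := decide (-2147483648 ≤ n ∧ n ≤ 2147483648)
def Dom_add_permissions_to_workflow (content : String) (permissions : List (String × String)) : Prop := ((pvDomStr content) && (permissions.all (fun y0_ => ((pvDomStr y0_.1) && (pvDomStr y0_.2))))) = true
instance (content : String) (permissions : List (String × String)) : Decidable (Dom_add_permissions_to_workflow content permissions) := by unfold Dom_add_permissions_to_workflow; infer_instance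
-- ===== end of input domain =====

-- B replaces A's single stateful break/continue scan by independent first-index
-- searches (jobs:, on:, first top-level key after on:) combined by a minimum —
-- objective: simpler decomposition.  Return value only (A mutates only a local list).

-- ===== PORT A =====
-- A's search loop (for ... break), as the obvious structural recursion over the
-- lines; `none` = the loop ran out without a break (on_block_end stays 0).
def aFindEnd : List String → Nat → Bool → Option Nat
  | [], _, _ => none
  | l :: rest, i, inOn =>
    let s := PySem.Str.strip l
    if PySem.Str.startswith s "on:" then aFindEnd rest (i + 1) true
    else if inOn && (!(s == "") && !PySem.Str.startswith l " " && !PySem.Str.startswith l "\t" && PySem.Str.isIn ":" s) then some i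
    else if inOn && PySem.Str.startswith s "jobs:" then some i
    else if PySem.Str.startswith s "jobs:" then some i
    else aFindEnd rest (i + 1) inOn

-- A's fallback loop: first 'name:' line → its index + 1, else insert_index stays 0.
def aFindName : List String → Nat → Nat
  | [], _ => 0
  | l :: rest, i =>
    if PySem.Str.startswith (PySem.Str.strip l) "name:" then i + 1 else aFindName rest (i + 1)

def add_permissions_to_workflow (content : String) (permissions : List (String × String)) : String :=
  let lines := (PySem.Str.split? content "\n").getD []   -- sep "\n" ≠ "", so split? is always `some`
  let on_block_end := (aFindEnd lines 0 false).getD 0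
  let insert_index := if on_block_end == 0 then aFindName lines 0 else on_block_end
  let permissions_lines : List String := ["", "# Required permissions for reusable workflows", "permissions:"]
  -- for key, value in sorted(permissions.items()): append f"  {key}: {value}"
  let permissions_lines := (PySem.List.sorted2 ((PySem.Dict.ofList permissions).items) (fun kv => kv.1) (fun kv => kv.2) false).foldl
      (fun acc kv => acc ++ ["  " ++ kv.1 ++ ": " ++ kv.2]) permissions_lines
  PySem.Str.join "\n" (lines.take insert_index ++ permissions_lines ++ lines.drop insert_index)

-- ===== PORT B =====
def bIsOn (l : String) : Bool := PySem.Str.startswith (PySem.Str.strip l) "on:"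
def bIsJobs (l : String) : Bool := PySem.Str.startswith (PySem.Str.strip l) "jobs:"
def bIsTopKey (l : String) : Bool :=
  let s := PySem.Str.strip l
  !bIsOn l && !(s == "") && !PySem.Str.startswith l " " && !PySem.Str.startswith l "\t" && PySem.Str.isIn ":" s

-- first_index(pred, start) of Source B
def bFirstIndex (lines : List String) (pred : String → Bool) (start : Nat) : Option Nat :=
  ((lines.drop start).findIdx? pred).map (· + start)

def add_permissions_to_workflow_alt (content : String) (permissions : List (String × String)) : String :=
  let lines := (PySem.Str.split? content "\n").getD []   -- sep "\n" ≠ "", so split? is always `some`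
  let jobsIdx := bFirstIndex lines bIsJobs 0
  let onIdx := bFirstIndex lines bIsOn 0
  let topIdx := match onIdx with
    | some j => bFirstIndex lines bIsTopKey (j + 1)
    | none => none
  -- min over the present candidates, 0 if there are none
  let endIdx := match jobsIdx, topIdx with
    | some a, some b => min a b
    | some a, none => a
    | none, some b => b
    | none, none => 0
  let insert_index := if endIdx ≠ 0 then endIdx
    else match bFirstIndex lines (fun l => PySem.Str.startswith (PySem.Str.strip l) "name:") 0 with
      | some n => n + 1
      | none => 0
  let block := ["", "# Required permissions for reusable workflows", "permissions:"] ++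
    (PySem.List.sorted2 ((PySem.Dict.ofList permissions).items) (fun kv => kv.1) (fun kv => kv.2) false).map
      (fun kv => "  " ++ kv.1 ++ ": " ++ kv.2)
  PySem.Str.join "\n" (lines.take insert_index ++ block ++ lines.drop insert_index)

-- ===== PRECONDITION & SPEC =====
def Spec_add_permissions_to_workflow (content : String) (permissions : List (String × String)) (out : String) : Prop := out = add_permissions_to_workflow_alt content permissions
instance (content : String) (permissions : List (String × String)) (out : String) : Decidable (Spec_add_permissions_to_workflow content permissions out) := by unfold Spec_add_permissions_to_workflow; infer_instance

-- ===== CLAIM (what is proved, stated in full; the proofs are below) =====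
def Claim_equal_add_permissions_to_workflow : Prop := ∀ (content : String) (permissions : List (String × String)), Dom_add_permissions_to_workflow content permissions → Spec_add_permissions_to_workflow content permissions (add_permissions_to_workflow content permissions)

-- ===== LEMMAS AND PROOFS =====

-- min of two optional indices (how B combines its candidates)
def minOpt : Option Nat → Option Nat → Option Nat
  | none, b => b
  | some a, none => some a
  | some a, some b => some (min a b)

theorem minOpt_map_succ (a b : Option Nat) :
    minOpt (a.map (· + 1)) (b.map (· + 1)) = (minOpt a b).map (· + 1) := by
  cases a <;> cases b <;> simp [minOpt, Nat.succ_min_succ]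

theorem minOpt_some_zero_left (b : Option Nat) : minOpt (some 0) b = some 0 := by
  cases b <;> simp [minOpt]

theorem minOpt_some_zero_right (a : Option Nat) : minOpt a (some 0) = some 0 := by
  cases a <;> simp [minOpt]

theorem map_add_add (o : Option Nat) (a b : Nat) :
    (o.map (· + a)).map (· + b) = o.map (· + (a + b)) := by
  cases o with
  | none => rfl
  | some k => simp; omega

theorem map_succ_add (o : Option Nat) (i : Nat) :
    (o.map (· + 1)).map (· + i) = o.map (· + (i + 1)) := by
  rw [map_add_add, Nat.add_comm 1 i]

theorem findIdx?_or (p q : String → Bool) (xs : List String) :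
    xs.findIdx? (fun x => p x || q x) = minOpt (xs.findIdx? p) (xs.findIdx? q) := by
  induction xs with
  | nil => simp [minOpt]
  | cons x t ih =>
    by_cases hp : p x = true <;> by_cases hq : q x = true <;>
      simp only [List.findIdx?_cons, hp, hq, Bool.or_true,
        Bool.or_false, Bool.false_eq_true, if_true, if_false, ih]
    · exact (minOpt_some_zero_left _).symm
    · exact (minOpt_some_zero_left _).symm
    · exact (minOpt_some_zero_right _).symm
    · rw [minOpt_map_succ]

theorem on_not_jobs (s : String) (h : PySem.Str.startswith s "on:" = true) :
    PySem.Str.startswith s "jobs:" = false := by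
  rw [PySem.Str.startswith_eq] at h ⊢
  rw [PySem.Chars.startswith_iff] at h
  by_contra hc
  rw [Bool.not_eq_false, PySem.Chars.startswith_iff] at hc
  obtain ⟨t1, e1⟩ := h
  obtain ⟨t2, e2⟩ := hc
  rw [← e1] at e2
  simp [show "jobs:".toList = ['j', 'o', 'b', 's', ':'] from rfl,
        show "on:".toList = ['o', 'n', ':'] from rfl] at e2

theorem bIsOn_not_jobs (l : String) (h : bIsOn l = true) : bIsJobs l = false := by
  simp only [bIsOn] at h
  simp only [bIsJobs]
  exact on_not_jobs _ h

theorem bIsOn_not_top (l : String) (h : bIsOn l = true) : bIsTopKey l = false := by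
  simp only [bIsTopKey, h, Bool.not_true, Bool.false_and]

-- step equations for A's loop, phrased through B's line predicates
theorem aFindEnd_cons_on (l : String) (rest : List String) (i : Nat) (inOn : Bool)
    (h : bIsOn l = true) : aFindEnd (l :: rest) i inOn = aFindEnd rest (i + 1) true := by
  simp only [bIsOn] at h
  simp only [aFindEnd, h, if_true]

theorem aFindEnd_cons_jobs (l : String) (rest : List String) (i : Nat) (inOn : Bool)
    (hOn : bIsOn l = false) (hj : bIsJobs l = true) : aFindEnd (l :: rest) i inOn = some i := by
  simp only [bIsOn] at hOn
  simp only [bIsJobs] at hj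
  simp only [aFindEnd, hOn, hj, Bool.false_eq_true, if_false, Bool.and_true, if_true]
  split_ifs <;> rfl

theorem aFindEnd_cons_skip (l : String) (rest : List String) (i : Nat) (inOn : Bool)
    (hOn : bIsOn l = false) (hj : bIsJobs l = false) (ht : bIsTopKey l = false) :
    aFindEnd (l :: rest) i inOn = aFindEnd rest (i + 1) inOn := by
  have hC : (!(PySem.Str.strip l == "") && !PySem.Str.startswith l " " && !PySem.Str.startswith l "\t" && PySem.Str.isIn ":" (PySem.Str.strip l)) = false := by
    have ht' := ht
    simp only [bIsTopKey] at ht'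
    rw [hOn] at ht'
    simpa only [Bool.not_false, Bool.true_and] using ht'
  simp only [bIsOn] at hOn
  simp only [bIsJobs] at hj
  simp only [aFindEnd, hOn, hj, hC, Bool.false_eq_true, if_false, Bool.and_false]

theorem aFindEnd_cons_false_skip (l : String) (rest : List String) (i : Nat)
    (hOn : bIsOn l = false) (hj : bIsJobs l = false) :
    aFindEnd (l :: rest) i false = aFindEnd rest (i + 1) false := by
  simp only [bIsOn] at hOn
  simp only [bIsJobs] at hj
  simp only [aFindEnd, hOn, hj, Bool.false_and, Bool.false_eq_true, if_false]

theorem aFindEnd_cons_true_top (l : String) (rest : List String) (i : Nat)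
    (hOn : bIsOn l = false) (ht : bIsTopKey l = true) : aFindEnd (l :: rest) i true = some i := by
  have hC : (!(PySem.Str.strip l == "") && !PySem.Str.startswith l " " && !PySem.Str.startswith l "\t" && PySem.Str.isIn ":" (PySem.Str.strip l)) = true := by
    have ht' := ht
    simp only [bIsTopKey] at ht'
    rw [hOn] at ht'
    simpa only [Bool.not_false, Bool.true_and] using ht'
  simp only [bIsOn] at hOn
  simp only [aFindEnd, hOn, hC, Bool.false_eq_true, if_false, Bool.true_and, if_true]

-- the in_on_block phase of A's loop breaks at the first jobs/top-level-key line
theorem aFindEnd_true (xs : List String) (i : Nat) :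
    aFindEnd xs i true = (xs.findIdx? (fun l => bIsJobs l || bIsTopKey l)).map (· + i) := by
  induction xs generalizing i with
  | nil => simp [aFindEnd]
  | cons l rest ih =>
    by_cases hOn : bIsOn l = true
    · have hj := bIsOn_not_jobs l hOn
      have ht := bIsOn_not_top l hOn
      rw [aFindEnd_cons_on l rest i true hOn, ih]
      simp only [List.findIdx?_cons, hj, ht, Bool.or_false, Bool.false_eq_true, if_false]
      exact (map_succ_add _ _).symm
    · have hOn' : bIsOn l = false := by simpa using hOn
      by_cases hTop : bIsTopKey l = true
      · rw [aFindEnd_cons_true_top l rest i hOn' hTop]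
        simp [List.findIdx?_cons, hTop]
      · have hTop' : bIsTopKey l = false := by simpa using hTop
        by_cases hJ : bIsJobs l = true
        · rw [aFindEnd_cons_jobs l rest i true hOn' hJ]
          simp [List.findIdx?_cons, hJ]
        · have hJ' : bIsJobs l = false := by simpa using hJ
          rw [aFindEnd_cons_skip l rest i true hOn' hJ' hTop', ih]
          simp only [List.findIdx?_cons, hJ', hTop', Bool.or_false, Bool.false_eq_true, if_false]
          exact (map_succ_add _ _).symm

-- B's combination of its three searches, as one Option-valued function of the lines
def combineO (xs : List String) : Option Nat :=
  minOpt (xs.findIdx? bIsJobs)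
    (match xs.findIdx? bIsOn with
     | some j => ((xs.drop (j + 1)).findIdx? bIsTopKey).map (· + (j + 1))
     | none => none)

theorem combineO_cons_on (l : String) (rest : List String) (hOn : bIsOn l = true) :
    combineO (l :: rest) =
      (minOpt (rest.findIdx? bIsJobs) (rest.findIdx? bIsTopKey)).map (· + 1) := by
  have hj := bIsOn_not_jobs l hOn
  unfold combineO
  simp only [List.findIdx?_cons, hj, hOn, Bool.false_eq_true, if_false, if_true,
    List.drop_succ_cons, List.drop_zero]
  rw [← minOpt_map_succ]

theorem combineO_cons_jobs (l : String) (rest : List String) (hJ : bIsJobs l = true) :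
    combineO (l :: rest) = some 0 := by
  unfold combineO
  simp only [List.findIdx?_cons, hJ, if_true]
  exact minOpt_some_zero_left _

theorem combineO_cons_skip (l : String) (rest : List String) (hOn : bIsOn l = false)
    (hJ : bIsJobs l = false) : combineO (l :: rest) = (combineO rest).map (· + 1) := by
  unfold combineO
  simp only [List.findIdx?_cons, hOn, hJ, Bool.false_eq_true, if_false]
  rw [← minOpt_map_succ]
  congr 1
  cases h : rest.findIdx? bIsOn with
  | none => simp
  | some j =>
    simp only [Option.map_some, List.drop_succ_cons]
    exact (map_add_add _ (j + 1) 1).symm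

theorem aFindEnd_false (xs : List String) (i : Nat) :
    aFindEnd xs i false = (combineO xs).map (· + i) := by
  induction xs generalizing i with
  | nil => simp [aFindEnd, combineO, minOpt]
  | cons l rest ih =>
    by_cases hOn : bIsOn l = true
    · rw [aFindEnd_cons_on l rest i false hOn, aFindEnd_true, combineO_cons_on l rest hOn,
        findIdx?_or]
      exact (map_succ_add _ _).symm
    · have hOn' : bIsOn l = false := by simpa using hOn
      by_cases hJ : bIsJobs l = true
      · rw [aFindEnd_cons_jobs l rest i false hOn' hJ, combineO_cons_jobs l rest hJ]
        simp
      · have hJ' : bIsJobs l = false := by simpa using hJ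
        rw [aFindEnd_cons_false_skip l rest i hOn' hJ', ih,
          combineO_cons_skip l rest hOn' hJ']
        exact (map_succ_add _ _).symm

theorem aFindName_eq (xs : List String) (i : Nat) :
    aFindName xs i = (match xs.findIdx? (fun l => PySem.Str.startswith (PySem.Str.strip l) "name:") with
      | some n => i + n + 1
      | none => 0) := by
  induction xs generalizing i with
  | nil => simp [aFindName]
  | cons l rest ih =>
    by_cases hN : PySem.Str.startswith (PySem.Str.strip l) "name:" = true
    · simp only [aFindName, hN, if_true, List.findIdx?_cons]
    · rw [show aFindName (l :: rest) i = aFindName rest (i + 1) by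
          simp only [aFindName, hN, Bool.false_eq_true, if_false], ih]
      simp only [List.findIdx?_cons, hN, Bool.false_eq_true, if_false]
      cases rest.findIdx? (fun l => PySem.Str.startswith (PySem.Str.strip l) "name:") with
      | none => rfl
      | some n => simp; omega

theorem foldl_append_singleton {α β : Type} (xs : List α) (init : List β) (f : α → β) :
    xs.foldl (fun acc x => acc ++ [f x]) init = init ++ xs.map f := by
  induction xs generalizing init with
  | nil => simp
  | cons x t ih => simp [ih]

theorem getD_minOpt (a b : Option Nat) :
    (minOpt a b).getD 0 = (match a, b with
      | some a', some b' => min a' b'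
      | some a', none => a'
      | none, some b' => b'
      | none, none => 0) := by
  cases a <;> cases b <;> simp [minOpt]

-- ===== VERDICT (by name: the statement is the Claim_ definition above) =====
theorem add_permissions_to_workflow_spec : Claim_equal_add_permissions_to_workflow := by
  intro content permissions _
  unfold Spec_add_permissions_to_workflow add_permissions_to_workflow add_permissions_to_workflow_alt
  simp only []
  set lines := (PySem.Str.split? content "\n").getD [] with hlines
  have h0 : ∀ (o : Option Nat), o.map (· + 0) = o := by intro o; cases o <;> simp
  -- both end-of-on-block computations agree
  have hend : (aFindEnd lines 0 false).getD 0 =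
      (match bFirstIndex lines bIsJobs 0,
        (match bFirstIndex lines bIsOn 0 with
         | some j => bFirstIndex lines bIsTopKey (j + 1)
         | none => none) with
      | some a, some b => min a b
      | some a, none => a
      | none, some b => b
      | none, none => 0) := by
    rw [aFindEnd_false, h0]
    rw [show combineO lines = minOpt (bFirstIndex lines bIsJobs 0)
        (match bFirstIndex lines bIsOn 0 with
         | some j => bFirstIndex lines bIsTopKey (j + 1)
         | none => none) by
      unfold combineO bFirstIndex
      simp only [List.drop_zero, h0]]
    exact getD_minOpt _ _
  -- hence both insertion indices agree
  have hins : (if (aFindEnd lines 0 false).getD 0 == 0 then aFindName lines 0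
        else (aFindEnd lines 0 false).getD 0) =
      (if (match bFirstIndex lines bIsJobs 0,
          (match bFirstIndex lines bIsOn 0 with
           | some j => bFirstIndex lines bIsTopKey (j + 1)
           | none => none) with
        | some a, some b => min a b
        | some a, none => a
        | none, some b => b
        | none, none => 0) ≠ 0 then
          (match bFirstIndex lines bIsJobs 0,
            (match bFirstIndex lines bIsOn 0 with
             | some j => bFirstIndex lines bIsTopKey (j + 1)
             | none => none) with
          | some a, some b => min a b
          | some a, none => a
          | none, some b => b
          | none, none => 0)
        else match bFirstIndex lines (fun l => PySem.Str.startswith (PySem.Str.strip l) "name:") 0 with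
          | some n => n + 1
          | none => 0) := by
    rw [← hend]
    by_cases hz : (aFindEnd lines 0 false).getD 0 = 0
    · simp only [hz, beq_self_eq_true, if_true, ne_eq, not_true_eq_false, if_false]
      rw [aFindName_eq]
      unfold bFirstIndex
      simp only [List.drop_zero, h0]
      cases lines.findIdx? (fun l => PySem.Str.startswith (PySem.Str.strip l) "name:") with
      | none => rfl
      | some n => simp
    · simp [hz]
  rw [hins, foldl_append_singleton]
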